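-- pv_equiv track=rewrite | github.com/alantao5056/USACO | contests/2017_february_bronze/cross_road_1/cross_road.py | getNumOfCross
-- ===== SOURCE A (Python) =====
-- def getNumOfCross(data: list):
--   crossCount = 0
--   crossHash = ['-1'] * 10
--   for record in data:
--     if crossHash[int(record[0]) - 1] == '-1':
--       crossHash[int(record[0]) - 1] = record[1]
--     elif crossHash[int(record[0]) - 1] != record[1]:
--       crossCount += 1
--       crossHash[int(record[0]) - 1] = record[1]
--   return crossCount
-- ===== SOURCE B (Python) =====
-- def getNumOfCross(data: list):
--   # two-phase: bucket the per-signal states, then count transitions per bucket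
--   buckets = [[] for _ in range(10)]
--   for record in data:
--     buckets[int(record[0]) - 1].append(record[1])
--   total = 0
--   for bucket in buckets:
--     last = '-1'
--     for s in bucket:
--       if last == '-1':
--         last = s
--       elif last != s:
--         total += 1
--         last = s
--   return total
-- ===== Notes on version B (the rewrite author's own statement) =====
-- stated objective: alternative
-- what changed: Replaces A's single pass with a mutable 10-slot last-state table by a two-phase algorithm: first partition the records' states into ten ordered buckets, then count adjacent transitions inside each bucket and sum them.
import Mathlib
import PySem

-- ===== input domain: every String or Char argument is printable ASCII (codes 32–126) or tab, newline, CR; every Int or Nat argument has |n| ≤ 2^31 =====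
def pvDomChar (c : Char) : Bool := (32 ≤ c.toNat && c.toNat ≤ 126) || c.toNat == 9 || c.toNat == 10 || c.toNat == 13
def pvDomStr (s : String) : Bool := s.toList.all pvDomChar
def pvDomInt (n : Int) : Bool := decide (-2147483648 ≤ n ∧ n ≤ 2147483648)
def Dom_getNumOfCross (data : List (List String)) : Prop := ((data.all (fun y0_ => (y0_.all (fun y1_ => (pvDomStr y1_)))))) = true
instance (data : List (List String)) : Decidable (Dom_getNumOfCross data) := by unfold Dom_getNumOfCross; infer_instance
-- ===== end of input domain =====

-- B replaces A's single pass over a mutable 10-slot last-state table by a two-phase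
-- algorithm (partition states into ten ordered buckets, then count transitions per
-- bucket); same cost, alternative structure.

-- shared helpers: int(record[0]) (default irrelevant under Pre_) and record[1]
def pvParse (record : List String) : Int :=
  (PySem.Int.ofStr? (PySem.List.pyGetD record 0 "")).getD 0

def pvVal (record : List String) : String :=
  PySem.List.pyGetD record 1 ""

-- ===== PORT A =====
def pvStepA (st : Int × List String) (record : List String) : Int × List String :=
  if PySem.List.pyGetD st.2 (pvParse record - 1) "" = "-1" then
    (st.1, PySem.List.pySetD st.2 (pvParse record - 1) (pvVal record))
  else if PySem.List.pyGetD st.2 (pvParse record - 1) "" ≠ pvVal record then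
    (st.1 + 1, PySem.List.pySetD st.2 (pvParse record - 1) (pvVal record))
  else st

def getNumOfCross (data : List (List String)) : Int :=
  (data.foldl pvStepA (0, List.replicate 10 "-1")).1

-- ===== PORT B =====
def pvStepB (bs : List (List String)) (record : List String) : List (List String) :=
  PySem.List.pySetD bs (pvParse record - 1)
    (PySem.List.pyGetD bs (pvParse record - 1) [] ++ [pvVal record])

def pvStepInner (st : Int × String) (s : String) : Int × String :=
  if st.2 = "-1" then (st.1, s)
  else if st.2 ≠ s then (st.1 + 1, s)
  else st

def pvStepOuter (total : Int) (bucket : List String) : Int :=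
  (bucket.foldl pvStepInner (total, "-1")).1

def getNumOfCross_alt (data : List (List String)) : Int :=
  let buckets := data.foldl pvStepB (List.replicate 10 [])
  buckets.foldl pvStepOuter 0

-- ===== PRECONDITION & SPEC =====
-- Pre_ is exactly where the Python A returns: each record has at least the two
-- accessed fields, record[0] parses as an int (else ValueError), and that int is
-- in [-9, 10] so that the index into the 10-slot table is in range (else IndexError).
def Pre_getNumOfCross (data : List (List String)) : Prop :=
  ∀ r ∈ data, 2 ≤ r.length ∧
    (PySem.Int.ofStr? (PySem.List.pyGetD r 0 "")).isSome = true ∧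
    -9 ≤ pvParse r ∧ pvParse r ≤ 10
instance (data : List (List String)) : Decidable (Pre_getNumOfCross data) := by
  unfold Pre_getNumOfCross; infer_instance

def pvWitness_getNumOfCross : List (List String) :=
  [["1", "G"], ["1", "R"], ["10", "G"], ["0", "R"]]

def Spec_getNumOfCross (data : List (List String)) (out : Int) : Prop := out = getNumOfCross_alt data
instance (data : List (List String)) (out : Int) : Decidable (Spec_getNumOfCross data out) := by unfold Spec_getNumOfCross; infer_instance

-- ===== CLAIM (what is proved, stated in full; the proofs are below) =====
def Claim_equal_getNumOfCross : Prop := ∀ (data : List (List String)), Dom_getNumOfCross data → Pre_getNumOfCross data → Spec_getNumOfCross data (getNumOfCross data)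

-- ===== LEMMAS AND PROOFS =====

-- the Nat index Python's negative-index wraparound lands on, for a length-10 list
def pvWrap (i : Int) : Nat := if 0 ≤ i then i.toNat else (i + 10).toNat

-- transitions of one bucket, as structural recursion (spec of B's inner loop)
def pvTrans : String → List String → Int
  | _, [] => 0
  | last, s :: t => if last = "-1" then pvTrans s t
      else if last ≠ s then 1 + pvTrans s t else pvTrans last t

def pvSumTrans : List String → List (List String) → Int
  | x :: xs, b :: bs => pvTrans x b + pvSumTrans xs bs
  | _, _ => 0

def pvSumTransNeg : List (List String) → Int
  | [] => 0
  | b :: bs => pvTrans "-1" b + pvSumTransNeg bs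

def pvBucket (j : Nat) (data : List (List String)) : List String :=
  data.filterMap (fun r => if pvWrap (pvParse r - 1) = j then some (pvVal r) else none)

def pvBuckets (data : List (List String)) : List (List String) :=
  (List.range 10).map (fun j => pvBucket j data)

def pvOk (data : List (List String)) : Prop :=
  ∀ r ∈ data, -10 ≤ pvParse r - 1 ∧ pvParse r - 1 < 10

lemma pvWrap_lt {i : Int} (h1 : -10 ≤ i) (h2 : i < 10) : pvWrap i < 10 := by
  unfold pvWrap; split_ifs <;> omega

lemma pvIdx_eq {i : Int} (h1 : -10 ≤ i) (h2 : i < 10) :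
    PySem.List.pyIdx? 10 i = some (pvWrap i) := by
  simp only [PySem.List.pyIdx?, pvWrap]
  split_ifs <;> simp_all <;> omega

lemma pvGetD_eq {α : Type} (xs : List α) {i : Int} (d : α) (hl : xs.length = 10)
    (h1 : -10 ≤ i) (h2 : i < 10) :
    PySem.List.pyGetD xs i d = xs.getD (pvWrap i) d := by
  simp only [PySem.List.pyGetD, PySem.List.pyGet?, hl, pvIdx_eq h1 h2, Option.bind_some]
  rw [List.getD_eq_getElem?_getD]

lemma pvSetD_eq {α : Type} (xs : List α) {i : Int} (v : α) (hl : xs.length = 10)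
    (h1 : -10 ≤ i) (h2 : i < 10) :
    PySem.List.pySetD xs i v = xs.set (pvWrap i) v := by
  simp only [PySem.List.pySetD, PySem.List.pySet?, hl, pvIdx_eq h1 h2, Option.map_some,
    Option.getD_some]

lemma pvSumTrans_step : ∀ (j : Nat) (h : List String) (bs : List (List String)) (v : String),
    j < h.length → h.length = bs.length →
    pvSumTrans h (bs.set j (v :: bs.getD j [])) =
      if h.getD j "" = "-1" then pvSumTrans (h.set j v) bs
      else if h.getD j "" ≠ v then 1 + pvSumTrans (h.set j v) bs
      else pvSumTrans h bs
  | 0, x :: hs, b :: bt, v, _, _ => by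
      simp only [List.getD_cons_zero, List.set_cons_zero, pvSumTrans, pvTrans]
      split_ifs <;> ring
  | j + 1, x :: hs, b :: bt, v, hj, hl => by
      simp only [List.getD_cons_succ, List.set_cons_succ, pvSumTrans]
      rw [pvSumTrans_step j hs bt v (by simp only [List.length_cons] at hj; omega)
            (by simp only [List.length_cons] at hl; omega)]
      split_ifs <;> ring
  | 0, [], _, _, hj, _ => by simp at hj
  | j + 1, [], _, _, hj, _ => by simp at hj
  | j + 1, x :: hs, [], v, hj, hl => by simp at hl

lemma pvBucket_cons (j : Nat) (r : List String) (t : List (List String)) :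
    pvBucket j (r :: t) =
      if pvWrap (pvParse r - 1) = j then pvVal r :: pvBucket j t else pvBucket j t := by
  simp only [pvBucket, List.filterMap_cons]
  split_ifs <;> simp

lemma pvMapRange_update {α : Type} (f g : Nat → α) (n j : Nat) (hj : j < n)
    (hagree : ∀ k, k ≠ j → g k = f k) :
    (List.range n).map g = ((List.range n).map f).set j (g j) := by
  apply List.ext_getElem
  · simp
  · intro i hi hi'
    simp only [List.length_map, List.length_range] at hi
    by_cases h : i = j
    · subst h; simp [List.getElem_set, hi]
    · have hji : ¬ j = i := fun hh => h hh.symm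
      simp [List.getElem_set, hji, hagree i h]

lemma pvBuckets_cons (r : List String) (t : List (List String))
    (h1 : -10 ≤ pvParse r - 1) (h2 : pvParse r - 1 < 10) :
    pvBuckets (r :: t) =
      (pvBuckets t).set (pvWrap (pvParse r - 1)) (pvVal r :: pvBucket (pvWrap (pvParse r - 1)) t) := by
  unfold pvBuckets
  rw [pvMapRange_update (fun j => pvBucket j t) (fun j => pvBucket j (r :: t)) 10
        (pvWrap (pvParse r - 1)) (pvWrap_lt h1 h2)]
  · simp [pvBucket_cons]
  · intro k hk; rw [pvBucket_cons, if_neg (Ne.symm hk)]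

lemma pvBuckets_length (data : List (List String)) : (pvBuckets data).length = 10 := by
  simp [pvBuckets]

lemma pvBuckets_getD (data : List (List String)) {j : Nat} (hj : j < 10) :
    (pvBuckets data).getD j [] = pvBucket j data := by
  rw [List.getD_eq_getElem?_getD]
  simp [pvBuckets, List.getElem?_map, List.getElem?_range, hj]

lemma pvBuckets_nil_empty : ∀ b ∈ pvBuckets [], b = ([] : List String) := by
  intro b hb
  simp only [pvBuckets, List.mem_map] at hb
  obtain ⟨j, _, rfl⟩ := hb
  simp [pvBucket]

lemma pvSumTrans_empty : ∀ (h : List String) (bs : List (List String)),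
    (∀ b ∈ bs, b = []) → pvSumTrans h bs = 0
  | [], bs, _ => by cases bs <;> rfl
  | x :: xs, [], _ => rfl
  | x :: xs, b :: bs, he => by
      have hb : b = [] := he b (by simp)
      subst hb
      simp only [pvSumTrans, pvTrans]
      rw [pvSumTrans_empty xs bs (fun b hb => he b (by simp [hb]))]
      simp

lemma pvMainA : ∀ (data : List (List String)) (h : List String) (c : Int),
    h.length = 10 → pvOk data →
    (data.foldl pvStepA (c, h)).1 = c + pvSumTrans h (pvBuckets data)
  | [], h, c, _, _ => by
      simp [List.foldl_nil, pvSumTrans_empty h _ pvBuckets_nil_empty]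
  | r :: t, h, c, hl, hok => by
      have hr := hok r (by simp)
      obtain ⟨h1, h2⟩ := hr
      have hok' : pvOk t := fun x hx => hok x (by simp [hx])
      have hwlt := pvWrap_lt h1 h2
      rw [List.foldl_cons]
      rw [pvBuckets_cons r t h1 h2]
      have hstep := pvSumTrans_step (pvWrap (pvParse r - 1)) h (pvBuckets t) (pvVal r)
        (by omega) (by rw [hl, pvBuckets_length])
      rw [pvBuckets_getD t hwlt] at hstep
      rw [hstep]
      have hga := pvGetD_eq h "" hl h1 h2
      have hsa := pvSetD_eq h (pvVal r) hl h1 h2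
      by_cases hc1 : h.getD (pvWrap (pvParse r - 1)) "" = "-1"
      · have hA : pvStepA (c, h) r = (c, h.set (pvWrap (pvParse r - 1)) (pvVal r)) := by
          simp only [pvStepA]; rw [hga, hsa, if_pos hc1]
        rw [hA, if_pos hc1, pvMainA t _ c (by simp [hl]) hok']
      · by_cases hc2 : h.getD (pvWrap (pvParse r - 1)) "" = pvVal r
        · have hA : pvStepA (c, h) r = (c, h) := by
            simp only [pvStepA]
            rw [hga, hsa, if_neg hc1, if_neg (not_not_intro hc2)]
          rw [hA, if_neg hc1, if_neg (not_not_intro hc2), pvMainA t h c hl hok']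
        · have hA : pvStepA (c, h) r = (c + 1, h.set (pvWrap (pvParse r - 1)) (pvVal r)) := by
            simp only [pvStepA]; rw [hga, hsa, if_neg hc1, if_pos hc2]
          rw [hA, if_neg hc1, if_pos hc2, pvMainA t _ (c + 1) (by simp [hl]) hok']
          ring

lemma pvZipSet {α : Type} (bs cs : List (List α)) (j : Nat) (v : α)
    (hj : j < bs.length) (hl : bs.length = cs.length) :
    List.zipWith (· ++ ·) (bs.set j (bs.getD j [] ++ [v])) cs =
      List.zipWith (· ++ ·) bs (cs.set j (v :: cs.getD j [])) := by
  apply List.ext_getElem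
  · simp
  · intro i hi hi'
    simp only [List.length_zipWith, List.length_set] at hi
    have hib : i < bs.length := by omega
    have hic : i < cs.length := by omega
    by_cases h : i = j
    · subst h
      simp [List.getElem_zipWith, List.getElem_set, List.getD_eq_getElem?_getD,
        List.getElem?_eq_getElem, hib, hic, List.append_assoc]
    · have hji : ¬ j = i := fun hh => h hh.symm
      simp [List.getElem_zipWith, List.getElem_set, h, hji]

lemma pvZipEmptyRight {α : Type} (bs cs : List (List α)) (hl : bs.length = cs.length)
    (he : ∀ c ∈ cs, c = []) : List.zipWith (· ++ ·) bs cs = bs := by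
  apply List.ext_getElem
  · simp; omega
  · intro i hi hi'
    have hic : i < cs.length := by omega
    have : cs[i] = [] := he _ (List.getElem_mem hic)
    simp [List.getElem_zipWith, this]

lemma pvZipEmptyLeft {α : Type} (cs : List (List α)) (hl : cs.length = 10) :
    List.zipWith (· ++ ·) (List.replicate 10 ([] : List α)) cs = cs := by
  apply List.ext_getElem
  · simp [hl]
  · intro i hi hi'
    simp only [List.getElem_zipWith, List.getElem_replicate, List.nil_append]

lemma pvMainB : ∀ (data : List (List String)) (bs : List (List String)),
    bs.length = 10 → pvOk data →
    data.foldl pvStepB bs = List.zipWith (· ++ ·) bs (pvBuckets data)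
  | [], bs, hl, _ => by
      rw [List.foldl_nil, pvZipEmptyRight bs _ (by rw [hl, pvBuckets_length]) pvBuckets_nil_empty]
  | r :: t, bs, hl, hok => by
      obtain ⟨h1, h2⟩ := hok r (by simp)
      have hok' : pvOk t := fun x hx => hok x (by simp [hx])
      have hwlt := pvWrap_lt h1 h2
      rw [List.foldl_cons]
      have hstep : pvStepB bs r = bs.set (pvWrap (pvParse r - 1)) (bs.getD (pvWrap (pvParse r - 1)) [] ++ [pvVal r]) := by
        simp only [pvStepB]
        rw [pvGetD_eq bs [] hl h1 h2, pvSetD_eq bs _ hl h1 h2]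
      rw [hstep, pvMainB t _ (by simp [hl]) hok']
      rw [pvBuckets_cons r t h1 h2]
      rw [← pvBuckets_getD t hwlt]
      exact pvZipSet bs (pvBuckets t) (pvWrap (pvParse r - 1)) (pvVal r) (by omega)
        (by rw [hl, pvBuckets_length])

lemma pvInner_eq : ∀ (bucket : List String) (c : Int) (last : String),
    (bucket.foldl pvStepInner (c, last)).1 = c + pvTrans last bucket
  | [], c, last => by simp [pvTrans]
  | s :: t, c, last => by
      rw [List.foldl_cons]
      by_cases hc1 : last = "-1"
      · have hstep : pvStepInner (c, last) s = (c, s) := by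
          simp only [pvStepInner]; rw [if_pos hc1]
        rw [hstep, pvInner_eq t c s]
        simp [pvTrans, hc1]
      · by_cases hc2 : last = s
        · have hstep : pvStepInner (c, last) s = (c, last) := by
            simp only [pvStepInner]
            rw [if_neg hc1, if_neg (not_not_intro hc2)]
          rw [hstep, pvInner_eq t c last]
          simp [pvTrans, hc1, hc2]
        · have hstep : pvStepInner (c, last) s = (c + 1, s) := by
            simp only [pvStepInner]; rw [if_neg hc1, if_pos hc2]
          rw [hstep, pvInner_eq t (c + 1) s]
          simp only [pvTrans]
          rw [if_neg hc1, if_pos hc2]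
          ring

lemma pvOuter_eq : ∀ (bs : List (List String)) (total : Int),
    bs.foldl pvStepOuter total = total + pvSumTransNeg bs
  | [], total => by simp [pvSumTransNeg]
  | b :: bs, total => by
      rw [List.foldl_cons]
      show List.foldl pvStepOuter (pvStepOuter total b) bs = _
      rw [pvOuter_eq bs (pvStepOuter total b)]
      unfold pvStepOuter
      rw [pvInner_eq b total "-1", pvSumTransNeg]
      ring

lemma pvSumTransNeg_eq : ∀ (bs : List (List String)),
    pvSumTrans (List.replicate bs.length "-1") bs = pvSumTransNeg bs
  | [] => rfl
  | b :: bs => by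
      simp only [List.length_cons, List.replicate_succ, pvSumTrans, pvSumTransNeg]
      rw [pvSumTransNeg_eq bs]

lemma pvPre_ok (data : List (List String)) (hpre : Pre_getNumOfCross data) : pvOk data := by
  intro r hr
  obtain ⟨_, _, h3, h4⟩ := hpre r hr
  omega

-- ===== VERDICT (by name: the statement is the Claim_ definition above) =====
theorem getNumOfCross_spec : Claim_equal_getNumOfCross := by
  intro data _ hpre
  unfold Spec_getNumOfCross getNumOfCross getNumOfCross_alt
  have hok := pvPre_ok data hpre
  rw [pvMainA data (List.replicate 10 "-1") 0 (by simp) hok]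
  rw [pvMainB data (List.replicate 10 []) (by simp) hok]
  rw [pvZipEmptyLeft _ (pvBuckets_length data)]
  rw [pvOuter_eq _ 0]
  have h10 : (pvBuckets data).length = 10 := pvBuckets_length data
  rw [← pvSumTransNeg_eq (pvBuckets data), h10]
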